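-- pv_equiv track=rewrite | github.com/reversebutterfly/sam2-pre-new | memshield/placement_profiler.py | feasible_candidates
-- ===== SOURCE A (Python) =====
-- from typing import Callable, Dict, List, Optional, Sequence, Tuple
--
-- def feasible_candidates(
--     candidates: Sequence[int], existing: Sequence[int], min_gap: int,
-- ) -> List[int]:
--     """Filter candidates by min_gap to existing positions.
--
--     A candidate c is feasible iff for every e in existing, |c - e| >= min_gap.
--     """
--     existing_set = set(int(e) for e in existing)
--     return [
--         int(c) for c in candidates
--         if int(c) not in existing_set
--         and all(abs(int(c) - int(e)) >= min_gap for e in existing)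
--     ]
-- ===== SOURCE B (Python) =====
-- def feasible_candidates(candidates, existing, min_gap):
--     # Sort existing once; per candidate, binary-search its insertion point and
--     # compare only the two nearest neighbours; a set handles exact-match exclusion.
--     s = sorted(int(e) for e in existing)
--     exist = set(s)
--     out = []
--     for c in candidates:
--         c = int(c)
--         if c in exist:
--             continue
--         lo, hi = 0, len(s)          # bisect_left, hand-written (A imports no bisect)
--         while lo < hi:
--             mid = (lo + hi) // 2
--             if s[mid] < c:
--                 lo = mid + 1
--             else:
--                 hi = mid
--         if lo > 0 and c - s[lo - 1] < min_gap:
--             continue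
--         if lo < len(s) and s[lo] - c < min_gap:
--             continue
--         out.append(c)
--     return out
-- ===== Notes on version B (the rewrite author's own statement) =====
-- stated objective: faster
-- what changed: Instead of scanning all existing positions for every candidate, B sorts existing once and binary-searches each candidate's insertion point, checking only the two nearest neighbours (plus a set for exact-match exclusion).
import Mathlib
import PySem

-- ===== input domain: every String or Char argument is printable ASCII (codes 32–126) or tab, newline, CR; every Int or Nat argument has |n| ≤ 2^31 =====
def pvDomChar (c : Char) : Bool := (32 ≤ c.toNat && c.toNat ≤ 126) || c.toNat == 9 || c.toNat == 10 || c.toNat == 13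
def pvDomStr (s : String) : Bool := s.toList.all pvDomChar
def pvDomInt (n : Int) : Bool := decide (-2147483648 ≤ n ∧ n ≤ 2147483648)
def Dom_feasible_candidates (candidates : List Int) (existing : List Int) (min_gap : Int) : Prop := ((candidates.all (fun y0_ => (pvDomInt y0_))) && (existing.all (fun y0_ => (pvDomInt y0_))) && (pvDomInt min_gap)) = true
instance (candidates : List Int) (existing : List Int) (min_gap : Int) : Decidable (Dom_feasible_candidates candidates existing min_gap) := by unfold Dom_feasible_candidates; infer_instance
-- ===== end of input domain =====

-- B sorts `existing` once and binary-searches each candidate's insertion point,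
-- checking only the two nearest neighbours (asymptotically faster than A's scan
-- of all of `existing` per candidate).

-- ===== PORT A =====
def feasible_candidates (candidates : List Int) (existing : List Int) (min_gap : Int) : List Int :=
  let existing_set := PySem.Set.ofList existing
  candidates.filter (fun c =>
    !(existing_set.contains c) && existing.all (fun e => decide (min_gap ≤ |c - e|)))

-- ===== PORT B =====
-- the hand-written `while lo < hi` loop in Source B is CPython's bisect_left loop,
-- which is exactly PySem.List.bisectLeft
def feasible_candidates_alt (candidates : List Int) (existing : List Int) (min_gap : Int) : List Int :=
  let s := PySem.List.sorted existing (fun x => x)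
  let exist := PySem.Set.ofList s
  candidates.foldl (fun out c =>
    if exist.contains c then out
    else
      let lo := PySem.List.bisectLeft s c
      if 0 < lo ∧ c - s.getD (lo - 1) 0 < min_gap then out
      else if lo < s.length ∧ s.getD lo 0 - c < min_gap then out
      else out ++ [c]) []

-- ===== PRECONDITION & SPEC =====
def Spec_feasible_candidates (candidates : List Int) (existing : List Int) (min_gap : Int) (out : List Int) : Prop := out = feasible_candidates_alt candidates existing min_gap
instance (candidates : List Int) (existing : List Int) (min_gap : Int) (out : List Int) : Decidable (Spec_feasible_candidates candidates existing min_gap out) := by unfold Spec_feasible_candidates; infer_instance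

-- ===== CLAIM (what is proved, stated in full; the proofs are below) =====
def Claim_equal_feasible_candidates : Prop := ∀ (candidates : List Int) (existing : List Int) (min_gap : Int), Dom_feasible_candidates candidates existing min_gap → Spec_feasible_candidates candidates existing min_gap (feasible_candidates candidates existing min_gap)

-- ===== LEMMAS AND PROOFS =====

-- B's per-candidate test, as a Bool predicate (same condition chain as the loop body)
def predB (s : List Int) (min_gap : Int) (c : Int) : Bool :=
  if (PySem.Set.ofList s).contains c then false
  else if 0 < PySem.List.bisectLeft s c ∧ c - s.getD (PySem.List.bisectLeft s c - 1) 0 < min_gap then false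
  else if PySem.List.bisectLeft s c < s.length ∧ s.getD (PySem.List.bisectLeft s c) 0 - c < min_gap then false
  else true

lemma foldl_step_eq (s : List Int) (min_gap : Int) (out : List Int) (c : Int) :
    (if (PySem.Set.ofList s).contains c then out
     else
       if 0 < PySem.List.bisectLeft s c ∧ c - s.getD (PySem.List.bisectLeft s c - 1) 0 < min_gap then out
       else if PySem.List.bisectLeft s c < s.length ∧ s.getD (PySem.List.bisectLeft s c) 0 - c < min_gap then out
       else out ++ [c]) = (if predB s min_gap c then out ++ [c] else out) := by
  unfold predB
  split_ifs <;> simp_all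

-- nearest-neighbour check on the sorted list ↔ the gap condition against every element
lemma neighbour_iff (s : List Int) (min_gap c : Int)
    (hs : List.Pairwise (fun a b => a ≤ b) s) :
    ((¬ (0 < PySem.List.bisectLeft s c ∧
          c - s.getD (PySem.List.bisectLeft s c - 1) 0 < min_gap)) ∧
     (¬ (PySem.List.bisectLeft s c < s.length ∧
          s.getD (PySem.List.bisectLeft s c) 0 - c < min_gap)))
    ↔ (∀ e ∈ s, min_gap ≤ |c - e|) := by
  obtain ⟨hle, hlt, hge⟩ := PySem.List.bisectLeft_spec s c hs
  set lo := PySem.List.bisectLeft s c with hlo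
  constructor
  · rintro ⟨h1, h2⟩ e he
    obtain ⟨j, hj, rfl⟩ := List.getElem_of_mem he
    by_cases hjlo : j < lo
    · have hjl : s[j] < c := hlt j hj hjlo
      have h0 : 0 < lo := Nat.lt_of_le_of_lt (Nat.zero_le j) hjlo
      have hlen : lo - 1 < s.length := by omega
      have hmono : s[j] ≤ s[lo - 1] := by
        rcases Nat.eq_or_lt_of_le (show j ≤ lo - 1 by omega) with h | h
        · simp [h]
        · exact (List.pairwise_iff_getElem.mp hs) j (lo - 1) hj hlen h
      have hng : ¬ (c - s.getD (lo - 1) 0 < min_gap) := fun hc => h1 ⟨h0, hc⟩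
      rw [List.getD_eq_getElem _ _ hlen] at hng
      rw [abs_of_pos (by omega)]
      omega
    · have hjc : c ≤ s[j] := hge j hj (by omega)
      have hlen : lo < s.length := Nat.lt_of_le_of_lt (by omega) hj
      have hmono : s[lo] ≤ s[j] := by
        rcases Nat.eq_or_lt_of_le (show lo ≤ j by omega) with h | h
        · simp [h]
        · exact (List.pairwise_iff_getElem.mp hs) lo j hlen hj h
      have hng : ¬ (s.getD lo 0 - c < min_gap) := fun hc => h2 ⟨hlen, hc⟩
      rw [List.getD_eq_getElem _ _ hlen] at hng
      rw [abs_of_nonpos (by omega)]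
      omega
  · intro hall
    constructor
    · rintro ⟨h0, hc⟩
      have hlen : lo - 1 < s.length := by omega
      have hlt' : s[lo - 1] < c := hlt (lo - 1) hlen (by omega)
      have h := hall s[lo - 1] (List.getElem_mem hlen)
      rw [abs_of_pos (by omega)] at h
      rw [List.getD_eq_getElem _ _ hlen] at hc
      omega
    · rintro ⟨hlen, hc⟩
      have hge' : c ≤ s[lo] := hge lo hlen (le_refl _)
      have h := hall s[lo] (List.getElem_mem hlen)
      rw [abs_of_nonpos (by omega)] at h
      rw [List.getD_eq_getElem _ _ hlen] at hc
      omega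

-- pointwise: A's filter test = B's filter test
lemma pred_eq (existing : List Int) (min_gap c : Int) :
    (!(PySem.Set.ofList existing).contains c &&
      existing.all (fun e => decide (min_gap ≤ |c - e|)))
    = predB (PySem.List.sorted existing (fun x => x)) min_gap c := by
  set s := PySem.List.sorted existing (fun x => x) with hsdef
  have hperm : s.Perm existing := PySem.List.sorted_perm existing (fun x => x) false
  have hpair : List.Pairwise (fun a b => a ≤ b) s := PySem.List.sorted_pairwise existing (fun x => x)
  unfold predB
  by_cases hc : c ∈ s
  · have hce : c ∈ existing := hperm.mem_iff.mp hc
    have h1 : (PySem.Set.ofList s).contains c = true := by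
      simp [PySem.Set.mem_ofList, hc]
    have h2 : (PySem.Set.ofList existing).contains c = true := by
      simp [PySem.Set.mem_ofList, hce]
    simp [PySem.Set.contains, PySem.Set.mem_ofList, hc, hce]
  · have hce : c ∉ existing := fun h => hc (hperm.mem_iff.mpr h)
    have h1 : (PySem.Set.ofList s).contains c = false := by
      simp [PySem.Set.mem_ofList, hc]
    have h2 : (PySem.Set.ofList existing).contains c = false := by
      simp [PySem.Set.mem_ofList, hce]
    rw [h1, h2]
    simp only [Bool.not_false, Bool.true_and, if_false, Bool.false_eq_true]
    have hall : (existing.all (fun e => decide (min_gap ≤ |c - e|)) = true)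
        ↔ (∀ e ∈ s, min_gap ≤ |c - e|) := by
      simp only [List.all_eq_true, decide_eq_true_eq]
      exact ⟨fun h e he => h e (hperm.mem_iff.mp he), fun h e he => h e (hperm.mem_iff.mpr he)⟩
    have hiff := neighbour_iff s min_gap c hpair
    by_cases hA : existing.all (fun e => decide (min_gap ≤ |c - e|)) = true
    · obtain ⟨hn1, hn2⟩ := hiff.mpr (hall.mp hA)
      simp only [List.getD_eq_getElem?_getD] at hn1 hn2
      simp [hA]
      exact ⟨by omega, by omega⟩
    · have hno : ¬ ((¬ (0 < PySem.List.bisectLeft s c ∧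
            c - s.getD (PySem.List.bisectLeft s c - 1) 0 < min_gap)) ∧
          (¬ (PySem.List.bisectLeft s c < s.length ∧
            s.getD (PySem.List.bisectLeft s c) 0 - c < min_gap))) :=
        fun h => hA (hall.mpr (hiff.mp h))
      rw [Bool.not_eq_true] at hA
      rw [hA]
      by_cases hb1 : 0 < PySem.List.bisectLeft s c ∧
          c - s.getD (PySem.List.bisectLeft s c - 1) 0 < min_gap
      · simp only [List.getD_eq_getElem?_getD] at hb1
        simp [hb1]
      · have hb2 : PySem.List.bisectLeft s c < s.length ∧
            s.getD (PySem.List.bisectLeft s c) 0 - c < min_gap := by tauto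
        have hgd : (s[PySem.List.bisectLeft s c]?).getD 0 = s[PySem.List.bisectLeft s c]'hb2.1 := by
          rw [List.getElem?_eq_getElem hb2.1]
          rfl
        simp only [List.getD_eq_getElem?_getD] at hb1 hb2
        simp [hb1, hb2]
        omega

-- ===== VERDICT (by name: the statement is the Claim_ definition above) =====
theorem feasible_candidates_spec : Claim_equal_feasible_candidates := by
  intro candidates existing min_gap _
  unfold Spec_feasible_candidates feasible_candidates feasible_candidates_alt
  simp only
  simp only [foldl_step_eq, PySem.List.foldl_append_if_eq_filter, List.nil_append]
  exact List.filter_congr (fun c _ => pred_eq existing min_gap c)
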